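-- pv_equiv track=rewrite | github.com/seansps/ogg-to-realm | src/data_mapper.py | _convert_adversary_description
-- ===== SOURCE A (Python) =====
-- def _convert_adversary_description(description: str, npc_name: str) -> str:
--     """Convert adversary description format to Realm VTT richtext format"""
--     if not description:
--         return ""
--
--     # Start with NPC name as H2
--     converted = f"<h2>{npc_name}</h2>\n\n"
--
--     # Add the description
--     converted += description
--
--     # Convert dice symbols from :symbol: format to proper spans
--     dice_mappings = {
--         ':boost:': '<span class="boost" data-dice-type="boost" contenteditable="false" style="display: inline-block;"></span>',
--         ':setback:': '<span class="setback" data-dice-type="setback" contenteditable="false" style="display: inline-block;"></span>',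
--         ':advantage:': '<span class="advantage" data-dice-type="advantage" contenteditable="false" style="display: inline-block;"></span>',
--         ':threat:': '<span class="threat" data-dice-type="threat" contenteditable="false" style="display: inline-block;"></span>',
--         ':success:': '<span class="success" data-dice-type="success" contenteditable="false" style="display: inline-block;"></span>',
--         ':failure:': '<span class="failure" data-dice-type="failure" contenteditable="false" style="display: inline-block;"></span>',
--         ':triumph:': '<span class="triumph" data-dice-type="triumph" contenteditable="false" style="display: inline-block;"></span>',
--         ':despair:': '<span class="despair" data-dice-type="despair" contenteditable="false" style="display: inline-block;"></span>',
--         ':force:': '<span class="force" data-dice-type="force" contenteditable="false" style="display: inline-block;"></span>',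
--         ':darkside:': '<span class="dark" data-dice-type="dark" contenteditable="false" style="display: inline-block;"></span>',
--         ':lightside:': '<span class="light" data-dice-type="light" contenteditable="false" style="display: inline-block;"></span>',
--         ':difficulty:': '<span class="difficulty" data-dice-type="difficulty" contenteditable="false" style="display: inline-block;"></span>',
--         ':challenge:': '<span class="challenge" data-dice-type="challenge" contenteditable="false" style="display: inline-block;"></span>',
--         ':ability:': '<span class="ability" data-dice-type="ability" contenteditable="false" style="display: inline-block;"></span>',
--         ':proficiency:': '<span class="proficiency" data-dice-type="proficiency" contenteditable="false" style="display: inline-block;"></span>'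
--     }
--
--     # Apply all dice symbol conversions
--     for old_symbol, new_span in dice_mappings.items():
--         converted = converted.replace(old_symbol, new_span)
--
--     return converted
-- ===== SOURCE B (Python) =====
-- _SPAN_TEMPLATE = ('<span class="{0}" data-dice-type="{0}" contenteditable="false" '
--                   'style="display: inline-block;"></span>')
--
-- # (word between the colons, css class used in the span)
-- _DICE_WORDS = [
--     ('boost', 'boost'), ('setback', 'setback'), ('advantage', 'advantage'),
--     ('threat', 'threat'), ('success', 'success'), ('failure', 'failure'),
--     ('triumph', 'triumph'), ('despair', 'despair'), ('force', 'force'),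
--     ('darkside', 'dark'), ('lightside', 'light'), ('difficulty', 'difficulty'),
--     ('challenge', 'challenge'), ('ability', 'ability'), ('proficiency', 'proficiency'),
-- ]
--
--
-- def _convert_adversary_description(description: str, npc_name: str) -> str:
--     """Single left-to-right pass: copy characters, and at each ':' try to
--     match one ':word:' dice token, emitting its span (built from a template)
--     and skipping past the token."""
--     if not description:
--         return ""
--     s = "<h2>" + npc_name + "</h2>\n\n" + description
--     out = []
--     i = 0
--     n = len(s)
--     while i < n:
--         c = s[i]
--         if c != ':':
--             out.append(c)
--             i += 1
--             continue
--         for word, cls in _DICE_WORDS: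
--             token = ':' + word + ':'
--             if s.startswith(token, i):
--                 out.append(_SPAN_TEMPLATE.format(cls))
--                 i += len(token)
--                 break
--         else:
--             out.append(':')
--             i += 1
--     return ''.join(out)
-- ===== Notes on version B (the rewrite author's own statement) =====
-- stated objective: alternative
-- what changed: A makes fifteen sequential full-string .replace passes (one per dice symbol); B converts the assembled header+description in a single left-to-right pass that, at each ':', matches one ':word:' token against a (word, css-class) list and emits a span built from one template.
import Mathlib
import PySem

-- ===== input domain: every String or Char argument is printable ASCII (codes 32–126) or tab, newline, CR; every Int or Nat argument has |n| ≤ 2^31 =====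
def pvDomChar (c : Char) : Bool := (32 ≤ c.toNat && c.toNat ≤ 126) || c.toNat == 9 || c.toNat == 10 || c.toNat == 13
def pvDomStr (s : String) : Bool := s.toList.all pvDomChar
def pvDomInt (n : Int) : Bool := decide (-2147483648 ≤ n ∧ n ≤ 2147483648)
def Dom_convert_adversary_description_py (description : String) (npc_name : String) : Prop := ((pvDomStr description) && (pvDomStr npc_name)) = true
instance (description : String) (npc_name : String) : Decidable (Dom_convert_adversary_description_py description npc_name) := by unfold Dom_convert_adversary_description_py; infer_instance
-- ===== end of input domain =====

-- B replaces A's fifteen sequential full-string `.replace` passes by a single left-to-right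
-- scan that matches a ':word:' dice token at each ':' and emits a span built from a template
-- (objective: alternative, one pass instead of 15; not claimed faster).

-- ===== PORT A =====
-- the dict literal of A, in insertion order: (symbol, replacement span), as Char lists
def pvDiceA : List (List Char × List Char) := [
  ([':', 'b', 'o', 'o', 's', 't', ':'],
   ['<', 's', 'p', 'a', 'n', ' ', 'c', 'l', 'a', 's', 's', '=', '"', 'b', 'o', 'o', 's', 't', '"', ' ', 'd', 'a', 't', 'a', '-', 'd', 'i', 'c', 'e', '-', 't', 'y', 'p', 'e', '=', '"', 'b', 'o', 'o', 's', 't', '"', ' ', 'c', 'o', 'n', 't', 'e', 'n', 't', 'e', 'd', 'i', 't', 'a', 'b', 'l', 'e', '=', '"', 'f', 'a', 'l', 's', 'e', '"', ' ', 's', 't', 'y', 'l', 'e', '=', '"', 'd', 'i', 's', 'p', 'l', 'a', 'y', ':', ' ', 'i', 'n', 'l', 'i', 'n', 'e', '-', 'b', 'l', 'o', 'c', 'k', ';', '"', '>', '<', '/', 's', 'p', 'a', 'n', '>']),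
  ([':', 's', 'e', 't', 'b', 'a', 'c', 'k', ':'],
   ['<', 's', 'p', 'a', 'n', ' ', 'c', 'l', 'a', 's', 's', '=', '"', 's', 'e', 't', 'b', 'a', 'c', 'k', '"', ' ', 'd', 'a', 't', 'a', '-', 'd', 'i', 'c', 'e', '-', 't', 'y', 'p', 'e', '=', '"', 's', 'e', 't', 'b', 'a', 'c', 'k', '"', ' ', 'c', 'o', 'n', 't', 'e', 'n', 't', 'e', 'd', 'i', 't', 'a', 'b', 'l', 'e', '=', '"', 'f', 'a', 'l', 's', 'e', '"', ' ', 's', 't', 'y', 'l', 'e', '=', '"', 'd', 'i', 's', 'p', 'l', 'a', 'y', ':', ' ', 'i', 'n', 'l', 'i', 'n', 'e', '-', 'b', 'l', 'o', 'c', 'k', ';', '"', '>', '<', '/', 's', 'p', 'a', 'n', '>']),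
  ([':', 'a', 'd', 'v', 'a', 'n', 't', 'a', 'g', 'e', ':'],
   ['<', 's', 'p', 'a', 'n', ' ', 'c', 'l', 'a', 's', 's', '=', '"', 'a', 'd', 'v', 'a', 'n', 't', 'a', 'g', 'e', '"', ' ', 'd', 'a', 't', 'a', '-', 'd', 'i', 'c', 'e', '-', 't', 'y', 'p', 'e', '=', '"', 'a', 'd', 'v', 'a', 'n', 't', 'a', 'g', 'e', '"', ' ', 'c', 'o', 'n', 't', 'e', 'n', 't', 'e', 'd', 'i', 't', 'a', 'b', 'l', 'e', '=', '"', 'f', 'a', 'l', 's', 'e', '"', ' ', 's', 't', 'y', 'l', 'e', '=', '"', 'd', 'i', 's', 'p', 'l', 'a', 'y', ':', ' ', 'i', 'n', 'l', 'i', 'n', 'e', '-', 'b', 'l', 'o', 'c', 'k', ';', '"', '>', '<', '/', 's', 'p', 'a', 'n', '>']),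
  ([':', 't', 'h', 'r', 'e', 'a', 't', ':'],
   ['<', 's', 'p', 'a', 'n', ' ', 'c', 'l', 'a', 's', 's', '=', '"', 't', 'h', 'r', 'e', 'a', 't', '"', ' ', 'd', 'a', 't', 'a', '-', 'd', 'i', 'c', 'e', '-', 't', 'y', 'p', 'e', '=', '"', 't', 'h', 'r', 'e', 'a', 't', '"', ' ', 'c', 'o', 'n', 't', 'e', 'n', 't', 'e', 'd', 'i', 't', 'a', 'b', 'l', 'e', '=', '"', 'f', 'a', 'l', 's', 'e', '"', ' ', 's', 't', 'y', 'l', 'e', '=', '"', 'd', 'i', 's', 'p', 'l', 'a', 'y', ':', ' ', 'i', 'n', 'l', 'i', 'n', 'e', '-', 'b', 'l', 'o', 'c', 'k', ';', '"', '>', '<', '/', 's', 'p', 'a', 'n', '>']),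
  ([':', 's', 'u', 'c', 'c', 'e', 's', 's', ':'],
   ['<', 's', 'p', 'a', 'n', ' ', 'c', 'l', 'a', 's', 's', '=', '"', 's', 'u', 'c', 'c', 'e', 's', 's', '"', ' ', 'd', 'a', 't', 'a', '-', 'd', 'i', 'c', 'e', '-', 't', 'y', 'p', 'e', '=', '"', 's', 'u', 'c', 'c', 'e', 's', 's', '"', ' ', 'c', 'o', 'n', 't', 'e', 'n', 't', 'e', 'd', 'i', 't', 'a', 'b', 'l', 'e', '=', '"', 'f', 'a', 'l', 's', 'e', '"', ' ', 's', 't', 'y', 'l', 'e', '=', '"', 'd', 'i', 's', 'p', 'l', 'a', 'y', ':', ' ', 'i', 'n', 'l', 'i', 'n', 'e', '-', 'b', 'l', 'o', 'c', 'k', ';', '"', '>', '<', '/', 's', 'p', 'a', 'n', '>']),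
  ([':', 'f', 'a', 'i', 'l', 'u', 'r', 'e', ':'],
   ['<', 's', 'p', 'a', 'n', ' ', 'c', 'l', 'a', 's', 's', '=', '"', 'f', 'a', 'i', 'l', 'u', 'r', 'e', '"', ' ', 'd', 'a', 't', 'a', '-', 'd', 'i', 'c', 'e', '-', 't', 'y', 'p', 'e', '=', '"', 'f', 'a', 'i', 'l', 'u', 'r', 'e', '"', ' ', 'c', 'o', 'n', 't', 'e', 'n', 't', 'e', 'd', 'i', 't', 'a', 'b', 'l', 'e', '=', '"', 'f', 'a', 'l', 's', 'e', '"', ' ', 's', 't', 'y', 'l', 'e', '=', '"', 'd', 'i', 's', 'p', 'l', 'a', 'y', ':', ' ', 'i', 'n', 'l', 'i', 'n', 'e', '-', 'b', 'l', 'o', 'c', 'k', ';', '"', '>', '<', '/', 's', 'p', 'a', 'n', '>']),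
  ([':', 't', 'r', 'i', 'u', 'm', 'p', 'h', ':'],
   ['<', 's', 'p', 'a', 'n', ' ', 'c', 'l', 'a', 's', 's', '=', '"', 't', 'r', 'i', 'u', 'm', 'p', 'h', '"', ' ', 'd', 'a', 't', 'a', '-', 'd', 'i', 'c', 'e', '-', 't', 'y', 'p', 'e', '=', '"', 't', 'r', 'i', 'u', 'm', 'p', 'h', '"', ' ', 'c', 'o', 'n', 't', 'e', 'n', 't', 'e', 'd', 'i', 't', 'a', 'b', 'l', 'e', '=', '"', 'f', 'a', 'l', 's', 'e', '"', ' ', 's', 't', 'y', 'l', 'e', '=', '"', 'd', 'i', 's', 'p', 'l', 'a', 'y', ':', ' ', 'i', 'n', 'l', 'i', 'n', 'e', '-', 'b', 'l', 'o', 'c', 'k', ';', '"', '>', '<', '/', 's', 'p', 'a', 'n', '>']),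
  ([':', 'd', 'e', 's', 'p', 'a', 'i', 'r', ':'],
   ['<', 's', 'p', 'a', 'n', ' ', 'c', 'l', 'a', 's', 's', '=', '"', 'd', 'e', 's', 'p', 'a', 'i', 'r', '"', ' ', 'd', 'a', 't', 'a', '-', 'd', 'i', 'c', 'e', '-', 't', 'y', 'p', 'e', '=', '"', 'd', 'e', 's', 'p', 'a', 'i', 'r', '"', ' ', 'c', 'o', 'n', 't', 'e', 'n', 't', 'e', 'd', 'i', 't', 'a', 'b', 'l', 'e', '=', '"', 'f', 'a', 'l', 's', 'e', '"', ' ', 's', 't', 'y', 'l', 'e', '=', '"', 'd', 'i', 's', 'p', 'l', 'a', 'y', ':', ' ', 'i', 'n', 'l', 'i', 'n', 'e', '-', 'b', 'l', 'o', 'c', 'k', ';', '"', '>', '<', '/', 's', 'p', 'a', 'n', '>']),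
  ([':', 'f', 'o', 'r', 'c', 'e', ':'],
   ['<', 's', 'p', 'a', 'n', ' ', 'c', 'l', 'a', 's', 's', '=', '"', 'f', 'o', 'r', 'c', 'e', '"', ' ', 'd', 'a', 't', 'a', '-', 'd', 'i', 'c', 'e', '-', 't', 'y', 'p', 'e', '=', '"', 'f', 'o', 'r', 'c', 'e', '"', ' ', 'c', 'o', 'n', 't', 'e', 'n', 't', 'e', 'd', 'i', 't', 'a', 'b', 'l', 'e', '=', '"', 'f', 'a', 'l', 's', 'e', '"', ' ', 's', 't', 'y', 'l', 'e', '=', '"', 'd', 'i', 's', 'p', 'l', 'a', 'y', ':', ' ', 'i', 'n', 'l', 'i', 'n', 'e', '-', 'b', 'l', 'o', 'c', 'k', ';', '"', '>', '<', '/', 's', 'p', 'a', 'n', '>']),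
  ([':', 'd', 'a', 'r', 'k', 's', 'i', 'd', 'e', ':'],
   ['<', 's', 'p', 'a', 'n', ' ', 'c', 'l', 'a', 's', 's', '=', '"', 'd', 'a', 'r', 'k', '"', ' ', 'd', 'a', 't', 'a', '-', 'd', 'i', 'c', 'e', '-', 't', 'y', 'p', 'e', '=', '"', 'd', 'a', 'r', 'k', '"', ' ', 'c', 'o', 'n', 't', 'e', 'n', 't', 'e', 'd', 'i', 't', 'a', 'b', 'l', 'e', '=', '"', 'f', 'a', 'l', 's', 'e', '"', ' ', 's', 't', 'y', 'l', 'e', '=', '"', 'd', 'i', 's', 'p', 'l', 'a', 'y', ':', ' ', 'i', 'n', 'l', 'i', 'n', 'e', '-', 'b', 'l', 'o', 'c', 'k', ';', '"', '>', '<', '/', 's', 'p', 'a', 'n', '>']),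
  ([':', 'l', 'i', 'g', 'h', 't', 's', 'i', 'd', 'e', ':'],
   ['<', 's', 'p', 'a', 'n', ' ', 'c', 'l', 'a', 's', 's', '=', '"', 'l', 'i', 'g', 'h', 't', '"', ' ', 'd', 'a', 't', 'a', '-', 'd', 'i', 'c', 'e', '-', 't', 'y', 'p', 'e', '=', '"', 'l', 'i', 'g', 'h', 't', '"', ' ', 'c', 'o', 'n', 't', 'e', 'n', 't', 'e', 'd', 'i', 't', 'a', 'b', 'l', 'e', '=', '"', 'f', 'a', 'l', 's', 'e', '"', ' ', 's', 't', 'y', 'l', 'e', '=', '"', 'd', 'i', 's', 'p', 'l', 'a', 'y', ':', ' ', 'i', 'n', 'l', 'i', 'n', 'e', '-', 'b', 'l', 'o', 'c', 'k', ';', '"', '>', '<', '/', 's', 'p', 'a', 'n', '>']),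
  ([':', 'd', 'i', 'f', 'f', 'i', 'c', 'u', 'l', 't', 'y', ':'],
   ['<', 's', 'p', 'a', 'n', ' ', 'c', 'l', 'a', 's', 's', '=', '"', 'd', 'i', 'f', 'f', 'i', 'c', 'u', 'l', 't', 'y', '"', ' ', 'd', 'a', 't', 'a', '-', 'd', 'i', 'c', 'e', '-', 't', 'y', 'p', 'e', '=', '"', 'd', 'i', 'f', 'f', 'i', 'c', 'u', 'l', 't', 'y', '"', ' ', 'c', 'o', 'n', 't', 'e', 'n', 't', 'e', 'd', 'i', 't', 'a', 'b', 'l', 'e', '=', '"', 'f', 'a', 'l', 's', 'e', '"', ' ', 's', 't', 'y', 'l', 'e', '=', '"', 'd', 'i', 's', 'p', 'l', 'a', 'y', ':', ' ', 'i', 'n', 'l', 'i', 'n', 'e', '-', 'b', 'l', 'o', 'c', 'k', ';', '"', '>', '<', '/', 's', 'p', 'a', 'n', '>']),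
  ([':', 'c', 'h', 'a', 'l', 'l', 'e', 'n', 'g', 'e', ':'],
   ['<', 's', 'p', 'a', 'n', ' ', 'c', 'l', 'a', 's', 's', '=', '"', 'c', 'h', 'a', 'l', 'l', 'e', 'n', 'g', 'e', '"', ' ', 'd', 'a', 't', 'a', '-', 'd', 'i', 'c', 'e', '-', 't', 'y', 'p', 'e', '=', '"', 'c', 'h', 'a', 'l', 'l', 'e', 'n', 'g', 'e', '"', ' ', 'c', 'o', 'n', 't', 'e', 'n', 't', 'e', 'd', 'i', 't', 'a', 'b', 'l', 'e', '=', '"', 'f', 'a', 'l', 's', 'e', '"', ' ', 's', 't', 'y', 'l', 'e', '=', '"', 'd', 'i', 's', 'p', 'l', 'a', 'y', ':', ' ', 'i', 'n', 'l', 'i', 'n', 'e', '-', 'b', 'l', 'o', 'c', 'k', ';', '"', '>', '<', '/', 's', 'p', 'a', 'n', '>']),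
  ([':', 'a', 'b', 'i', 'l', 'i', 't', 'y', ':'],
   ['<', 's', 'p', 'a', 'n', ' ', 'c', 'l', 'a', 's', 's', '=', '"', 'a', 'b', 'i', 'l', 'i', 't', 'y', '"', ' ', 'd', 'a', 't', 'a', '-', 'd', 'i', 'c', 'e', '-', 't', 'y', 'p', 'e', '=', '"', 'a', 'b', 'i', 'l', 'i', 't', 'y', '"', ' ', 'c', 'o', 'n', 't', 'e', 'n', 't', 'e', 'd', 'i', 't', 'a', 'b', 'l', 'e', '=', '"', 'f', 'a', 'l', 's', 'e', '"', ' ', 's', 't', 'y', 'l', 'e', '=', '"', 'd', 'i', 's', 'p', 'l', 'a', 'y', ':', ' ', 'i', 'n', 'l', 'i', 'n', 'e', '-', 'b', 'l', 'o', 'c', 'k', ';', '"', '>', '<', '/', 's', 'p', 'a', 'n', '>']),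
  ([':', 'p', 'r', 'o', 'f', 'i', 'c', 'i', 'e', 'n', 'c', 'y', ':'],
   ['<', 's', 'p', 'a', 'n', ' ', 'c', 'l', 'a', 's', 's', '=', '"', 'p', 'r', 'o', 'f', 'i', 'c', 'i', 'e', 'n', 'c', 'y', '"', ' ', 'd', 'a', 't', 'a', '-', 'd', 'i', 'c', 'e', '-', 't', 'y', 'p', 'e', '=', '"', 'p', 'r', 'o', 'f', 'i', 'c', 'i', 'e', 'n', 'c', 'y', '"', ' ', 'c', 'o', 'n', 't', 'e', 'n', 't', 'e', 'd', 'i', 't', 'a', 'b', 'l', 'e', '=', '"', 'f', 'a', 'l', 's', 'e', '"', ' ', 's', 't', 'y', 'l', 'e', '=', '"', 'd', 'i', 's', 'p', 'l', 'a', 'y', ':', ' ', 'i', 'n', 'l', 'i', 'n', 'e', '-', 'b', 'l', 'o', 'c', 'k', ';', '"', '>', '<', '/', 's', 'p', 'a', 'n', '>'])]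
def convert_adversary_description_py (description : String) (npc_name : String) : String :=
  if description.toList = [] then ""
  else
    String.ofList (List.foldl (fun acc kv => PySem.Chars.replace acc kv.1 kv.2)
      ("<h2>".toList ++ npc_name.toList ++ "</h2>\n\n".toList ++ description.toList) pvDiceA)

-- ===== PORT B =====
-- _DICE_WORDS of Source B: (word between the colons, css class used in the span)
def pvTable : List (List Char × List Char) := [
  (['b', 'o', 'o', 's', 't'], ['b', 'o', 'o', 's', 't']),
  (['s', 'e', 't', 'b', 'a', 'c', 'k'], ['s', 'e', 't', 'b', 'a', 'c', 'k']),
  (['a', 'd', 'v', 'a', 'n', 't', 'a', 'g', 'e'], ['a', 'd', 'v', 'a', 'n', 't', 'a', 'g', 'e']),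
  (['t', 'h', 'r', 'e', 'a', 't'], ['t', 'h', 'r', 'e', 'a', 't']),
  (['s', 'u', 'c', 'c', 'e', 's', 's'], ['s', 'u', 'c', 'c', 'e', 's', 's']),
  (['f', 'a', 'i', 'l', 'u', 'r', 'e'], ['f', 'a', 'i', 'l', 'u', 'r', 'e']),
  (['t', 'r', 'i', 'u', 'm', 'p', 'h'], ['t', 'r', 'i', 'u', 'm', 'p', 'h']),
  (['d', 'e', 's', 'p', 'a', 'i', 'r'], ['d', 'e', 's', 'p', 'a', 'i', 'r']),
  (['f', 'o', 'r', 'c', 'e'], ['f', 'o', 'r', 'c', 'e']),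
  (['d', 'a', 'r', 'k', 's', 'i', 'd', 'e'], ['d', 'a', 'r', 'k']),
  (['l', 'i', 'g', 'h', 't', 's', 'i', 'd', 'e'], ['l', 'i', 'g', 'h', 't']),
  (['d', 'i', 'f', 'f', 'i', 'c', 'u', 'l', 't', 'y'], ['d', 'i', 'f', 'f', 'i', 'c', 'u', 'l', 't', 'y']),
  (['c', 'h', 'a', 'l', 'l', 'e', 'n', 'g', 'e'], ['c', 'h', 'a', 'l', 'l', 'e', 'n', 'g', 'e']),
  (['a', 'b', 'i', 'l', 'i', 't', 'y'], ['a', 'b', 'i', 'l', 'i', 't', 'y']),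
  (['p', 'r', 'o', 'f', 'i', 'c', 'i', 'e', 'n', 'c', 'y'], ['p', 'r', 'o', 'f', 'i', 'c', 'i', 'e', 'n', 'c', 'y'])]

-- token = ':' + word + ':'
def pvKey (w : List Char) : List Char := ':' :: w ++ [':']

-- _SPAN_TEMPLATE.format(cls): the three constant pieces around the two class slots
def pvTpl1 : List Char := ['<', 's', 'p', 'a', 'n', ' ', 'c', 'l', 'a', 's', 's', '=', '"']
def pvTpl2 : List Char := ['"', ' ', 'd', 'a', 't', 'a', '-', 'd', 'i', 'c', 'e', '-', 't', 'y', 'p', 'e', '=', '"']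
def pvTpl3 : List Char := ['"', ' ', 'c', 'o', 'n', 't', 'e', 'n', 't', 'e', 'd', 'i', 't', 'a', 'b', 'l', 'e', '=', '"', 'f', 'a', 'l', 's', 'e', '"', ' ', 's', 't', 'y', 'l', 'e', '=', '"', 'd', 'i', 's', 'p', 'l', 'a', 'y', ':', ' ', 'i', 'n', 'l', 'i', 'n', 'e', '-', 'b', 'l', 'o', 'c', 'k', ';', '"', '>', '<', '/', 's', 'p', 'a', 'n', '>']
def pvSpanFor (c : List Char) : List Char := pvTpl1 ++ c ++ pvTpl2 ++ c ++ pvTpl3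

-- the inner for/break of Source B: first table row whose token is a prefix of s
def pvFindKey (s : List Char) : List (List Char × List Char) → Option (List Char × Nat)
  | [] => none
  | p :: rest =>
    if (pvKey p.1).isPrefixOf s then some (pvSpanFor p.2, (pvKey p.1).length)
    else pvFindKey s rest

-- the single left-to-right while loop of Source B (the suffix from i is the argument)
def pvScan : List Char → List Char
  | [] => []
  | c :: t =>
    if c = ':' then
      match pvFindKey (c :: t) pvTable with
      | some (v, n) => v ++ pvScan (t.drop (n - 1))
      | none => ':' :: pvScan t
    else c :: pvScan t
  termination_by s => s.length
  decreasing_by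
  all_goals (simp [List.length_drop]; try omega)

def convert_adversary_description_py_alt (description : String) (npc_name : String) : String :=
  match description.toList with
  | [] => ""
  | _ :: _ =>
    String.ofList (pvScan ("<h2>".toList ++ npc_name.toList ++ "</h2>\n\n".toList
      ++ description.toList))

-- ===== PRECONDITION & SPEC =====
-- s is free of chained dice tokens ':w1:w2:' whose right word comes EARLIER in the table
-- than the left word (there A's dict-order pass and B's left-to-right pass resolve the
-- shared ':' differently; both readings are defensible, so such inputs are excluded).
def pvChainFree (s : List Char) : Prop :=
  ∀ i < pvTable.length, ∀ j < i,
    ¬ ((pvKey (pvTable.getD i ([], [])).1 ++ (pvTable.getD j ([], [])).1 ++ [':']) <:+: s)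

-- Pre_ excludes only inputs whose text chains two dice tokens on a shared colon with the
-- right-hand token's word earlier in the dict: there A's value (dict-order replacement)
-- and B's value (leftmost token wins) are both accidental readings of an unspecified corner.
def Pre_convert_adversary_description_py (description : String) (npc_name : String) : Prop :=
  description.toList = [] ∨
    pvChainFree ("<h2>".toList ++ npc_name.toList ++ "</h2>\n\n".toList ++ description.toList)

instance (description : String) (npc_name : String) : Decidable (Pre_convert_adversary_description_py description npc_name) := by
  unfold Pre_convert_adversary_description_py pvChainFree; infer_instance

def pvWitness_convert_adversary_description_py : String × String :=
  ("A :boost: die and a :setback: die", "Guard")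

def Spec_convert_adversary_description_py (description : String) (npc_name : String) (out : String) : Prop := out = convert_adversary_description_py_alt description npc_name
instance (description : String) (npc_name : String) (out : String) : Decidable (Spec_convert_adversary_description_py description npc_name out) := by unfold Spec_convert_adversary_description_py; infer_instance

-- ===== CLAIM (what is proved, stated in full; the proofs are below) =====
def Claim_equal_convert_adversary_description_py : Prop := ∀ (description : String) (npc_name : String), Dom_convert_adversary_description_py description npc_name → Pre_convert_adversary_description_py description npc_name → Spec_convert_adversary_description_py description npc_name (convert_adversary_description_py description npc_name)

-- ===== LEMMAS AND PROOFS =====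

-- A's dict literal is exactly the table of B with key/span assembled
def pvEntry (p : List Char × List Char) : List Char × List Char := (pvKey p.1, pvSpanFor p.2)

set_option maxRecDepth 10000 in
theorem pvDiceA_eq : pvDiceA = pvTable.map pvEntry := by decide

-- ---- cheap decided facts about the table (words/classes only; spans are handled generically)
theorem pvFactW : ∀ p ∈ pvTable, p.1 ≠ [] ∧ (':' ∉ p.1) ∧ ('<' ∉ p.1) ∧ (' ' ∉ p.1) ∧ (':' ∉ p.2) := by decide
theorem pvFactInj : ∀ p ∈ pvTable, ∀ q ∈ pvTable, p.1 = q.1 → p = q := by decide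
theorem pvFactNodup : pvTable.Nodup := by decide

theorem pvKey_eq (w : List Char) : pvKey w = ':' :: (w ++ [':']) := by simp [pvKey]

theorem pvKey_ne_nil (w : List Char) : pvKey w ≠ [] := by simp [pvKey]

theorem pvKey_len (w : List Char) : (pvKey w).length = w.length + 2 := by
  simp [pvKey]

theorem pvLt_not_mem_key {w : List Char} (hw : '<' ∉ w) : '<' ∉ pvKey w := by
  intro h
  rw [pvKey_eq] at h
  simp only [List.mem_cons, List.mem_append] at h
  rcases h with h | h | h
  · exact absurd h (by decide)
  · exact hw h
  · exact absurd h (by decide)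

theorem pvLt_not_mem_chain {w : List Char} (hw : '<' ∉ w) : '<' ∉ w ++ [':'] := by
  intro h
  simp only [List.mem_append, List.mem_singleton] at h
  rcases h with h | h
  · exact hw h
  · exact absurd h (by decide)

-- ---- span properties, generic in the css class
-- "every ':' in v is at a non-final position and followed by ' '"
def pvCS (v : List Char) : Prop :=
  ∀ p, p < v.length → v.getD p 'x' = ':' → p + 1 < v.length ∧ v.getD (p + 1) 'x' = ' '

theorem pvCS_append_left {u v : List Char} (hu : ':' ∉ u) (hv : pvCS v) : pvCS (u ++ v) := by
  intro p hp hcol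
  rw [List.length_append] at hp
  by_cases h : p < u.length
  · have hmem : (':' : Char) ∈ u := by
      rw [List.getD_append _ _ _ _ h, List.getD_eq_getElem u 'x' h] at hcol
      exact hcol ▸ List.getElem_mem h
    exact absurd hmem hu
  · have h : u.length ≤ p := not_lt.mp h
    rw [List.getD_append_right _ _ _ _ h] at hcol
    obtain ⟨h1, h2⟩ := hv (p - u.length) (by omega) hcol
    refine ⟨by rw [List.length_append]; omega, ?_⟩
    rw [List.getD_append_right _ _ _ _ (by omega)]
    have : p + 1 - u.length = p - u.length + 1 := by omega
    rw [this]; exact h2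

theorem pvCS_tpl3 : pvCS pvTpl3 := by unfold pvCS; decide

theorem pvCS_span {c : List Char} (hc : ':' ∉ c) : pvCS (pvSpanFor c) := by
  have hA : ':' ∉ pvTpl1 := by decide
  have hB : ':' ∉ pvTpl2 := by decide
  have hassoc : pvSpanFor c = pvTpl1 ++ (c ++ (pvTpl2 ++ (c ++ pvTpl3))) := by
    simp [pvSpanFor, List.append_assoc]
  rw [hassoc]
  exact pvCS_append_left hA (pvCS_append_left hc (pvCS_append_left hB
    (pvCS_append_left hc pvCS_tpl3)))

theorem pvSpan_head {c : List Char} : (pvSpanFor c).getD 0 'x' = '<' ∧ (pvSpanFor c) ≠ [] := by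
  have hA : pvTpl1 = '<' :: ['s', 'p', 'a', 'n', ' ', 'c', 'l', 'a', 's', 's', '=', '\"'] := by decide
  unfold pvSpanFor
  rw [hA]
  exact ⟨rfl, by simp⟩

-- ---- unfolding equations of PySem.Chars.replace.go
theorem pvGo_zero (old new : List Char) (l acc : List Char) :
    PySem.Chars.replace.go old new 0 l acc = acc.reverse ++ l := by
  rw [PySem.Chars.replace.go.eq_def]

theorem pvGo_nil (old new : List Char) (f : Nat) (acc : List Char) :
    PySem.Chars.replace.go old new f [] acc = acc.reverse := by
  rw [PySem.Chars.replace.go.eq_def]; rcases f with _ | f <;> simp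

theorem pvGo_cons_pos (old new : List Char) (f : Nat) (c : Char) (t acc : List Char)
    (h : old.isPrefixOf (c :: t) = true) :
    PySem.Chars.replace.go old new (f + 1) (c :: t) acc
      = PySem.Chars.replace.go old new f (List.drop old.length (c :: t)) (new.reverse ++ acc) := by
  conv_lhs => rw [PySem.Chars.replace.go.eq_def]
  simp [h]

theorem pvGo_cons_neg (old new : List Char) (f : Nat) (c : Char) (t acc : List Char)
    (h : ¬ old.isPrefixOf (c :: t) = true) :
    PySem.Chars.replace.go old new (f + 1) (c :: t) acc
      = PySem.Chars.replace.go old new f t (c :: acc) := by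
  conv_lhs => rw [PySem.Chars.replace.go.eq_def]
  simp [h]

theorem pvGo_spec (old new : List Char) (hold : old ≠ []) :
    ∀ f l acc, l.length ≤ f →
      PySem.Chars.replace.go old new f l acc
        = acc.reverse ++ PySem.Chars.replace.go old new l.length l [] := by
  have holdlen : 0 < old.length := List.length_pos_of_ne_nil hold
  intro f
  induction f using Nat.strong_induction_on with
  | _ f ih =>
    intro l acc hl
    cases l with
    | nil => simp [pvGo_nil]
    | cons c t =>
      simp only [List.length_cons] at hl ⊢
      cases f with
      | zero => omega
      | succ f =>
        by_cases hp : old.isPrefixOf (c :: t) = true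
        · have hd : (List.drop old.length (c :: t)).length ≤ f := by
            simp [List.length_drop]; omega
          have hd2 : (List.drop old.length (c :: t)).length ≤ t.length := by
            simp [List.length_drop]; omega
          rw [pvGo_cons_pos _ _ _ _ _ _ hp, ih f (by omega) _ _ hd,
            pvGo_cons_pos _ _ _ _ _ _ hp, ih t.length (by omega) _ _ hd2]
          simp
        · rw [pvGo_cons_neg _ _ _ _ _ _ hp, ih f (by omega) _ _ (by omega),
            pvGo_cons_neg _ _ _ _ _ _ hp, ih t.length (by omega) _ _ (le_refl _),
            ih t.length (by omega) t [c] (le_refl _)]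
          simp

theorem pvReplace_nil (old new : List Char) (hold : old ≠ []) :
    PySem.Chars.replace [] old new = [] := by
  simp [PySem.Chars.replace, hold, pvGo_zero]

theorem pvReplace_pos (s old new : List Char) (hold : old ≠ []) (h : old <+: s) :
    PySem.Chars.replace s old new
      = new ++ PySem.Chars.replace (List.drop old.length s) old new := by
  have holdlen : 0 < old.length := List.length_pos_of_ne_nil hold
  cases s with
  | nil =>
    have : old = [] := List.prefix_nil.mp h
    exact absurd this hold
  | cons c t =>
    have hp : old.isPrefixOf (c :: t) = true := List.isPrefixOf_iff_prefix.mpr h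
    simp only [PySem.Chars.replace]
    have h1 : (c :: t).length = t.length + 1 := rfl
    rw [h1, pvGo_cons_pos _ _ _ _ _ _ hp,
      pvGo_spec _ _ hold _ _ _ (by simp [List.length_drop]; omega)]
    simp [hold]

theorem pvReplace_neg (c : Char) (t old new : List Char) (hold : old ≠ [])
    (h : ¬ old <+: (c :: t)) :
    PySem.Chars.replace (c :: t) old new = c :: PySem.Chars.replace t old new := by
  have hp : ¬ old.isPrefixOf (c :: t) = true := by
    rw [List.isPrefixOf_iff_prefix]; exact h
  simp only [PySem.Chars.replace]
  have h1 : (c :: t).length = t.length + 1 := rfl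
  rw [h1, pvGo_cons_neg _ _ _ _ _ _ hp, pvGo_spec _ _ hold _ _ _ (le_refl _)]
  simp [hold]

-- ---- replace preserves "k' is not a prefix" (k' without '<', spans start with '<')
theorem pvNoPrefix_replace {k' t old new : List Char} (hold : old ≠ [])
    (hnew : new.getD 0 'x' = '<' ∧ new ≠ []) (hk : '<' ∉ k')
    (h : ¬ k' <+: t) : ¬ k' <+: PySem.Chars.replace t old new := by
  obtain ⟨hnew0, hnewne⟩ := hnew
  obtain ⟨n0, ns, rfl⟩ : ∃ n0 ns, new = n0 :: ns := by
    cases new with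
    | nil => exact absurd rfl hnewne
    | cons a b => exact ⟨a, b, rfl⟩
  have hn0 : n0 = '<' := by simpa using hnew0
  subst hn0
  clear hnew0 hnewne
  suffices H : ∀ N t k', '<' ∉ k' → t.length ≤ N → ¬ k' <+: t →
      ¬ k' <+: PySem.Chars.replace t old ('<' :: ns) from H t.length t k' hk (le_refl _) h
  clear h hk
  intro N
  induction N with
  | zero =>
    intro t k' hk ht hnp
    have : t = [] := List.eq_nil_of_length_eq_zero (by omega)
    subst this
    rw [pvReplace_nil _ _ hold]; exact hnp
  | succ N ih =>
    intro t k' hk ht hnp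
    have hk'ne : k' ≠ [] := fun he => hnp (he ▸ List.nil_prefix)
    obtain ⟨a, k'', rfl⟩ : ∃ a k'', k' = a :: k'' := by
      cases k' with
      | nil => exact absurd rfl hk'ne
      | cons a b => exact ⟨a, b, rfl⟩
    by_cases hpre : old <+: t
    · rw [pvReplace_pos _ _ _ hold hpre]
      intro hcon
      rw [List.cons_append, List.cons_prefix_cons] at hcon
      exact hk (hcon.1 ▸ List.mem_cons_self)
    · cases t with
      | nil => rw [pvReplace_nil _ _ hold]; exact hnp
      | cons c t' =>
        rw [pvReplace_neg _ _ _ _ hold hpre]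
        intro hcon
        rw [List.cons_prefix_cons] at hcon
        obtain ⟨rfl, hcon2⟩ := hcon
        have hnp' : ¬ k'' <+: t' := fun hh => hnp (List.cons_prefix_cons.mpr ⟨rfl, hh⟩)
        have hk'' : '<' ∉ k'' := fun hh => hk (List.mem_cons_of_mem _ hh)
        exact ih t' k'' hk'' (by simp at ht; omega) hnp' hcon2

-- ---- pushing replace through an untouched region
theorem pvReplace_append (a u old new : List Char) (hold : old ≠ [])
    (h : ∀ p < a.length, ¬ old <+: List.drop p (a ++ u)) :
    PySem.Chars.replace (a ++ u) old new = a ++ PySem.Chars.replace u old new := by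
  induction a with
  | nil => simp
  | cons d a' ih =>
    have h0 : ¬ old <+: (d :: (a' ++ u)) := by
      have := h 0 (by simp)
      simpa using this
    have hshift : ∀ p < a'.length, ¬ old <+: List.drop p (a' ++ u) := by
      intro p hp
      have := h (p + 1) (by simp; omega)
      simpa [List.drop_succ_cons] using this
    rw [List.cons_append, pvReplace_neg _ _ _ _ hold h0, ih hshift, List.cons_append]

-- no key starts inside a colon-space region (a span)
theorem pvNoKey_in_span {v w : List Char} (hCS : pvCS v) (hw : w ≠ []) (hw1 : ':' ∉ w)
    (hw2 : ' ' ∉ w) : ∀ u, ∀ p < v.length, ¬ pvKey w <+: (List.drop p v ++ u) := by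
  intro u p hp hcon
  obtain ⟨w0, w', rfl⟩ : ∃ w0 w', w = w0 :: w' := by
    cases w with
    | nil => exact absurd rfl hw
    | cons a b => exact ⟨a, b, rfl⟩
  have hkey : pvKey (w0 :: w') = ':' :: w0 :: (w' ++ [':']) := by simp [pvKey]
  rw [hkey, List.drop_eq_getElem_cons hp, List.cons_append, List.cons_prefix_cons] at hcon
  obtain ⟨h1, hcon⟩ := hcon
  obtain ⟨hlt2, hsp⟩ := hCS p hp (by rw [List.getD_eq_getElem _ _ hp]; exact h1.symm)
  rw [List.drop_eq_getElem_cons hlt2, List.cons_append, List.cons_prefix_cons] at hcon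
  have : w0 = ' ' := by
    rw [List.getD_eq_getElem _ _ hlt2] at hsp
    exact hcon.1.trans hsp
  exact hw2 (this ▸ List.mem_cons_self)

-- ':w1:' followed by w2++':' forces w1 = w2 (words are colon-free)
theorem pvWordsEq {w1 w2 u : List Char} (h1 : ':' ∉ w1) (h2 : ':' ∉ w2)
    (h : (w1 ++ [':']) <+: (w2 ++ ':' :: u)) : w1 = w2 := by
  induction w1 generalizing w2 with
  | nil =>
    cases w2 with
    | nil => rfl
    | cons b w2' =>
      exfalso
      rw [List.nil_append, List.cons_append, List.cons_prefix_cons] at h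
      exact h2 (h.1 ▸ List.mem_cons_self)
  | cons a w1' ih =>
    cases w2 with
    | nil =>
      exfalso
      rw [List.nil_append, List.cons_append, List.cons_prefix_cons] at h
      exact h1 (h.1 ▸ List.mem_cons_self)
    | cons b w2' =>
      rw [List.cons_append, List.cons_append, List.cons_prefix_cons] at h
      obtain ⟨rfl, h⟩ := h
      have := ih (fun hh => h1 (List.mem_cons_of_mem _ hh))
        (fun hh => h2 (List.mem_cons_of_mem _ hh)) h
      rw [this]

-- no key (with a different word, no chain in u) starts inside the region of key w1
theorem pvNoKey_in_key {w1 w2 u : List Char} (h1 : ':' ∉ w1)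
    (h2 : ':' ∉ w2) (hne : w2 ≠ w1)
    (hu : ¬ (w2 ++ [':']) <+: u) :
    ∀ p < (pvKey w1).length, ¬ pvKey w2 <+: List.drop p (pvKey w1 ++ u) := by
  intro p hp hcon
  have hkeyapp : pvKey w1 ++ u = ':' :: (w1 ++ ':' :: u) := by simp [pvKey]
  rw [hkeyapp] at hcon
  simp only [pvKey, List.length_cons, List.length_append, List.length_nil] at hp
  cases p with
  | zero =>
    rw [List.drop_zero, pvKey_eq, List.cons_prefix_cons] at hcon
    exact hne (pvWordsEq h2 h1 hcon.2)
  | succ p =>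
    rw [List.drop_succ_cons] at hcon
    by_cases hpw : p < w1.length
    · rw [List.drop_append_of_le_length (le_of_lt hpw),
        List.drop_eq_getElem_cons hpw] at hcon
      obtain ⟨r, hr⟩ := hcon
      rw [pvKey_eq] at hr
      simp only [List.cons_append] at hr
      have hhead : (':' : Char) = w1[p] := ((List.cons.injEq _ _ _ _).mp hr).1
      exact h1 (hhead ▸ List.getElem_mem hpw)
    · have hpeq : p = w1.length := by omega
      subst hpeq
      rw [List.drop_left, pvKey_eq, List.cons_prefix_cons] at hcon
      exact hu hcon.2

-- two keys that are prefixes of the same list have the same word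
theorem pvKeyUnique {w1 w2 s : List Char} (h1 : ':' ∉ w1) (h2 : ':' ∉ w2)
    (k1 : pvKey w1 <+: s) (k2 : pvKey w2 <+: s) : w1 = w2 := by
  rcases List.prefix_or_prefix_of_prefix k1 k2 with h | h
  · rw [pvKey_eq, pvKey_eq, List.cons_prefix_cons] at h
    exact pvWordsEq h1 h2 (by simpa using h.2)
  · rw [pvKey_eq, pvKey_eq, List.cons_prefix_cons] at h
    exact (pvWordsEq h2 h1 (by simpa using h.2)).symm

-- ---- pvFindKey
theorem pvFindKey_none {s : List Char} {L : List (List Char × List Char)}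
    (h : ∀ p ∈ L, ¬ pvKey p.1 <+: s) : pvFindKey s L = none := by
  induction L with
  | nil => rfl
  | cons p L' ih =>
    have h0 : ¬ (pvKey p.1).isPrefixOf s = true := by
      rw [List.isPrefixOf_iff_prefix]
      exact h p List.mem_cons_self
    simp only [pvFindKey, h0]
    exact ih (fun q hq => h q (List.mem_cons_of_mem _ hq))

theorem pvFindKey_some {s : List Char} {p : List Char × List Char}
    {L : List (List Char × List Char)}
    (hmem : p ∈ L) (hpre : pvKey p.1 <+: s)
    (huniq : ∀ q ∈ L, pvKey q.1 <+: s → q = p) :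
    pvFindKey s L = some (pvSpanFor p.2, (pvKey p.1).length) := by
  induction L with
  | nil => exact absurd hmem (List.not_mem_nil)
  | cons q L' ih =>
    by_cases h0 : pvKey q.1 <+: s
    · have : q = p := huniq q List.mem_cons_self h0
      subst this
      simp [pvFindKey, List.isPrefixOf_iff_prefix.mpr h0]
    · have h0' : ¬ (pvKey q.1).isPrefixOf s = true := by
        rw [List.isPrefixOf_iff_prefix]; exact h0
      simp only [pvFindKey, h0']
      have hmem' : p ∈ L' := by
        rcases List.mem_cons.mp hmem with h | h
        · exact absurd (h ▸ hpre) h0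
        · exact h
      exact ih hmem' (fun r hr hrp => huniq r (List.mem_cons_of_mem _ hr) hrp)

-- ---- the fold of A over a list of entries
def pvRepl (acc : List Char) (kv : List Char × List Char) : List Char :=
  PySem.Chars.replace acc kv.1 kv.2

theorem pvFold_nil {L : List (List Char × List Char)} :
    List.foldl pvRepl [] (L.map pvEntry) = [] := by
  induction L with
  | nil => rfl
  | cons p L' ih =>
    have : pvRepl [] (pvEntry p) = [] := pvReplace_nil _ _ (by simp [pvEntry, pvKey])
    simp only [List.map_cons, List.foldl_cons, this]
    exact ih

-- phase 1: keys with other words pass over the leading key w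
theorem pvFold_key {L : List (List Char × List Char)} (hsub : ∀ q ∈ L, q ∈ pvTable)
    {w : List Char} (hw : ':' ∉ w)
    (hne : ∀ q ∈ L, q.1 ≠ w) :
    ∀ t, (∀ q ∈ L, ¬ (q.1 ++ [':']) <+: t) →
    List.foldl pvRepl (pvKey w ++ t) (L.map pvEntry)
      = pvKey w ++ List.foldl pvRepl t (L.map pvEntry) := by
  induction L with
  | nil => intro t _; simp
  | cons q L' ih =>
    intro t Ht
    have hqT : q ∈ pvTable := hsub q List.mem_cons_self
    obtain ⟨hqne, hqcol, hqlt, hqsp, hqcls⟩ := pvFactW q hqT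
    have hstep : pvRepl (pvKey w ++ t) (pvEntry q) = pvKey w ++ pvRepl t (pvEntry q) := by
      apply pvReplace_append _ _ _ _ (pvKey_ne_nil _)
      exact pvNoKey_in_key hw hqcol
        (hne q List.mem_cons_self) (Ht q List.mem_cons_self)
    simp only [List.map_cons, List.foldl_cons, hstep]
    exact ih (fun r hr => hsub r (List.mem_cons_of_mem _ hr))
      (fun r hr => hne r (List.mem_cons_of_mem _ hr))
      (pvRepl t (pvEntry q))
      (fun r hr => by
        obtain ⟨hrne, hrcol, hrlt, hrsp, hrcls⟩ := pvFactW r (hsub r (List.mem_cons_of_mem _ hr))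
        exact pvNoPrefix_replace (pvKey_ne_nil _)
          ⟨pvSpan_head.1, pvSpan_head.2⟩ (pvLt_not_mem_chain hrlt)
          (Ht r (List.mem_cons_of_mem _ hr)))

-- phase 2: any keys pass over an inserted span
theorem pvFold_span {L : List (List Char × List Char)} (hsub : ∀ q ∈ L, q ∈ pvTable)
    {v : List Char} (hCS : pvCS v) :
    ∀ u, List.foldl pvRepl (v ++ u) (L.map pvEntry)
      = v ++ List.foldl pvRepl u (L.map pvEntry) := by
  induction L with
  | nil => intro u; simp
  | cons q L' ih =>
    intro u
    have hqT : q ∈ pvTable := hsub q List.mem_cons_self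
    obtain ⟨hqne, hqcol, hqlt, hqsp, hqcls⟩ := pvFactW q hqT
    have hstep : pvRepl (v ++ u) (pvEntry q) = v ++ pvRepl u (pvEntry q) := by
      apply pvReplace_append _ _ _ _ (pvKey_ne_nil _)
      intro p hp
      rw [List.drop_append_of_le_length (le_of_lt hp)]
      exact pvNoKey_in_span hCS hqne hqcol hqsp u p hp
    simp only [List.map_cons, List.foldl_cons, hstep]
    exact ih (fun r hr => hsub r (List.mem_cons_of_mem _ hr)) (pvRepl u (pvEntry q))

-- no key is a prefix: the fold passes over the first character
theorem pvFold_cons {L : List (List Char × List Char)} (hsub : ∀ q ∈ L, q ∈ pvTable)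
    {c : Char} : ∀ t, (∀ q ∈ L, ¬ pvKey q.1 <+: (c :: t)) →
    List.foldl pvRepl (c :: t) (L.map pvEntry)
      = c :: List.foldl pvRepl t (L.map pvEntry) := by
  induction L with
  | nil => intro t _; simp
  | cons q L' ih =>
    intro t H
    have hqT : q ∈ pvTable := hsub q List.mem_cons_self
    obtain ⟨hqne, hqcol, hqlt, hqsp, hqcls⟩ := pvFactW q hqT
    have hstep : pvRepl (c :: t) (pvEntry q) = c :: pvRepl t (pvEntry q) :=
      pvReplace_neg _ _ _ _ (pvKey_ne_nil _) (H q List.mem_cons_self)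
    simp only [List.map_cons, List.foldl_cons, hstep]
    exact ih (fun r hr => hsub r (List.mem_cons_of_mem _ hr))
      (pvRepl t (pvEntry q))
      (fun r hr => by
        obtain ⟨hrne, hrcol, hrlt, hrsp, hrcls⟩ := pvFactW r (hsub r (List.mem_cons_of_mem _ hr))
        have := pvNoPrefix_replace (old := pvKey q.1) (new := pvSpanFor q.2)
          (pvKey_ne_nil _) ⟨pvSpan_head.1, pvSpan_head.2⟩ (pvLt_not_mem_key hrlt)
          (H r (List.mem_cons_of_mem _ hr))
        rw [show PySem.Chars.replace (c :: t) (pvKey q.1) (pvSpanFor q.2)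
            = pvRepl (c :: t) (pvEntry q) from rfl, hstep] at this
        exact this)

theorem pvScan_nil : pvScan [] = [] := by simp [pvScan]

theorem pvScan_cons (c : Char) (t : List Char) :
    pvScan (c :: t)
      = if c = ':' then
          (match pvFindKey (c :: t) pvTable with
           | some (v, n) => v ++ pvScan (t.drop (n - 1))
           | none => ':' :: pvScan t)
        else c :: pvScan t := by
  rw [pvScan]

-- ---- main equivalence on the character level
theorem pvMain : ∀ N s, s.length ≤ N → pvChainFree s →
    List.foldl pvRepl s (pvTable.map pvEntry) = pvScan s := by
  intro N
  induction N with
  | zero =>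
    intro s hs _
    have : s = [] := List.eq_nil_of_length_eq_zero (by omega)
    subst this
    rw [pvFold_nil, pvScan_nil]
  | succ N ih =>
    intro s hs hcf
    cases s with
    | nil => rw [pvFold_nil, pvScan_nil]
    | cons c t =>
      by_cases hex : ∃ p, p ∈ pvTable ∧ pvKey p.1 <+: (c :: t)
      · obtain ⟨p, hpT, hppre⟩ := hex
        obtain ⟨hpne, hpcol, hplt, hpsp, hpcls⟩ := pvFactW p hpT
        obtain ⟨t', ht'⟩ := hppre
        have hsuf : t' <:+ (c :: t) := ⟨pvKey p.1, ht'⟩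
        have hcf' : pvChainFree t' := fun i hi j hj hinf =>
          hcf i hi j hj (hinf.trans hsuf.isInfix)
        have hlen0 := congrArg List.length ht'
        simp only [List.length_append, pvKey_len, List.length_cons] at hlen0
        simp only [List.length_cons] at hs
        have hlen' : t'.length ≤ N := by omega
        obtain ⟨L1, L2, hTab⟩ := List.append_of_mem hpT
        have hnodup := pvFactNodup
        rw [hTab, List.nodup_append] at hnodup
        have hqnep : ∀ q ∈ L1, q ≠ p := fun q hq => hnodup.2.2 q hq p List.mem_cons_self
        have hL1T : ∀ q ∈ L1, q ∈ pvTable := fun q hq => hTab ▸ List.mem_append_left _ hq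
        have hL2T : ∀ q ∈ L2, q ∈ pvTable :=
          fun q hq => hTab ▸ List.mem_append_right _ (List.mem_cons_of_mem _ hq)
        have hqne1 : ∀ q ∈ L1, q.1 ≠ p.1 :=
          fun q hq he => hqnep q hq (pvFactInj q (hL1T q hq) p hpT he)
        have Ht : ∀ q ∈ L1, ¬ (q.1 ++ [':']) <+: t' := by
          intro q hq hchain
          obtain ⟨j, hj, hLj⟩ := List.mem_iff_getElem.mp hq
          have hgi : pvTable.getD L1.length ([], []) = p := by
            rw [hTab, List.getD_append_right _ _ _ _ (le_refl _)]
            simp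
          have hgj : pvTable.getD j ([], []) = q := by
            rw [hTab, List.getD_append _ _ _ _ hj, List.getD_eq_getElem _ _ hj, hLj]
          have hcc := hcf L1.length (by rw [hTab]; simp) j hj
          rw [hgi, hgj] at hcc
          apply hcc
          obtain ⟨r, hr⟩ := hchain
          have hpre2 : (pvKey p.1 ++ q.1 ++ [':']) <+: (c :: t) :=
            ⟨r, by rw [← ht', ← hr]; simp [List.append_assoc]⟩
          exact hpre2.isInfix
        rw [← ht', hTab, List.map_append, List.foldl_append,
          List.map_cons, List.foldl_cons]
        rw [pvFold_key hL1T hpcol hqne1 t' Ht]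
        have hmid : pvRepl (pvKey p.1 ++ List.foldl pvRepl t' (L1.map pvEntry)) (pvEntry p)
            = pvSpanFor p.2 ++ pvRepl (List.foldl pvRepl t' (L1.map pvEntry)) (pvEntry p) := by
          simp only [pvRepl, pvEntry]
          rw [pvReplace_pos _ _ _ (pvKey_ne_nil _) (List.prefix_append _ _), List.drop_left]
        rw [hmid, pvFold_span hL2T (pvCS_span hpcls)]
        have hre : List.foldl pvRepl
              (pvRepl (List.foldl pvRepl t' (L1.map pvEntry)) (pvEntry p)) (L2.map pvEntry)
            = List.foldl pvRepl t' (pvTable.map pvEntry) := by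
          rw [hTab, List.map_append, List.foldl_append, List.map_cons,
            List.foldl_cons]
        rw [hre, ih t' hlen' hcf']
        have hkeyuniq : ∀ q ∈ pvTable, pvKey q.1 <+: (pvKey p.1 ++ t') → q = p := by
          intro q hqT hkpre
          obtain ⟨hqne', hqcol', _, _, _⟩ := pvFactW q hqT
          have h1 : q.1 = p.1 := pvKeyUnique hqcol' hpcol hkpre (List.prefix_append _ _)
          exact pvFactInj q hqT p hpT h1
        have hfk : pvFindKey (pvKey p.1 ++ t') pvTable
            = some (pvSpanFor p.2, (pvKey p.1).length) :=
          pvFindKey_some hpT (List.prefix_append _ _) hkeyuniq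
        have hshape : pvKey p.1 ++ t' = ':' :: ((p.1 ++ [':']) ++ t') := by
          rw [pvKey_eq]; simp
        have hdrop : ((p.1 ++ [':']) ++ t').drop ((pvKey p.1).length - 1) = t' := by
          rw [pvKey_len]
          have h3 : p.1.length + 2 - 1 = (p.1 ++ [':']).length := by simp
          rw [h3, List.drop_left]
        rw [hshape] at hfk ⊢
        rw [pvScan_cons]
        simp only [hfk, hdrop, if_true]
      · have hall : ∀ q ∈ pvTable, ¬ pvKey q.1 <+: (c :: t) := by
          intro q hq hcon
          exact hex ⟨q, hq, hcon⟩
        have hsuf : t <:+ (c :: t) := List.suffix_cons c t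
        have hcf' : pvChainFree t := fun i hi j hj hinf =>
          hcf i hi j hj (hinf.trans hsuf.isInfix)
        rw [pvFold_cons (fun q hq => hq) t hall, ih t (by simp at hs; omega) hcf']
        have hfk : pvFindKey (c :: t) pvTable = none := pvFindKey_none hall
        rw [pvScan_cons, hfk]
        by_cases hc : c = ':'
        · subst hc; simp
        · simp [hc]

-- ===== VERDICT (by name: the statement is the Claim_ definition above) =====
theorem convert_adversary_description_py_spec : Claim_equal_convert_adversary_description_py := by
  intro description npc_name _ hPre
  unfold Spec_convert_adversary_description_py
  unfold convert_adversary_description_py convert_adversary_description_py_alt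
  cases hD : description.toList with
  | nil => simp
  | cons c t =>
    rcases hPre with h | h
    · rw [hD] at h; exact absurd h (by simp)
    · rw [hD] at h
      rw [if_neg (by simp), pvDiceA_eq]
      exact congrArg String.ofList (pvMain _ _ le_rfl h)
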